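-- pv_equiv track=rewrite | github.com/Maxilef/cryptanalyse-cesar-vigenere | syntaxe.py | nb_apparitions
-- ===== SOURCE A (Python) =====
-- def nb_apparitions(chaine):
--     """
--     compte le nombre d'occurance de chaque lettre dans une chaine de caractere
--     """
--
--     dico_apparitions = {}
--     for lettre in chaine :
--         if 'A' <= lettre <= 'Z' :
--             if lettre in dico_apparitions :
--                 dico_apparitions[lettre] += 1
--             else :
--                 dico_apparitions[lettre] = 1
--
--     # tri du dico par ordre alphabetique
--     dico_apparitions_tri = {lettre: dico_apparitions[lettre] for lettre in sorted(dico_apparitions.keys())}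
--
--     return dico_apparitions_tri
-- ===== SOURCE B (Python) =====
-- def nb_apparitions(chaine):
--     """
--     compte le nombre d'occurance de chaque lettre dans une chaine de caractere
--     (fixed alphabet scan: for each uppercase letter in order, count it in the string)
--     """
--     resultat = {}
--     for code in range(65, 91):
--         lettre = chr(code)
--         n = chaine.count(lettre)
--         if n != 0:
--             resultat[lettre] = n
--     return resultat
-- ===== Notes on version B (the rewrite author's own statement) =====
-- stated objective: simpler
-- what changed: B drops A's dict-accumulation-then-key-sort entirely: it scans the fixed alphabet A..Z in order and counts each letter with str.count, emitting present letters directly in alphabetical order with no dictionary bookkeeping and no sort.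
import Mathlib
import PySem

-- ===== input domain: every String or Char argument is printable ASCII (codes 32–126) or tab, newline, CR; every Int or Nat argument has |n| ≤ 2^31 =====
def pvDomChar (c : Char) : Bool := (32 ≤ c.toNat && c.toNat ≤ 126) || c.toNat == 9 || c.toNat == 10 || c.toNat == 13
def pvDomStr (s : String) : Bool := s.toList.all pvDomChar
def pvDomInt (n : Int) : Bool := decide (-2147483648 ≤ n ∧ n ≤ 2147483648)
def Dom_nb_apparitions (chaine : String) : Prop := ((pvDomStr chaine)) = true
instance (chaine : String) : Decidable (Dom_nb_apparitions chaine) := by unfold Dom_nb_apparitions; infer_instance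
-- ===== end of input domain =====

-- B replaces A's accumulate-in-a-dict-then-sort-the-keys strategy by a single scan over the
-- fixed 26-letter alphabet in order, counting each letter in the string (objective: simpler).


-- ===== PORT A =====
-- literal transliteration of A: accumulate counts in a dict over the string, then rebuild the
-- dict over the sorted keys ('dico[lettre] += 1' is ported as insert of getD + 1, exact since
-- that branch runs only when the key is present)
def nb_apparitions (chaine : String) : List (String × Int) :=
  let dico := chaine.toList.foldl
    (fun d lettre =>
      if 'A' ≤ lettre ∧ lettre ≤ 'Z' then
        if d.contains lettre then d.insert lettre (d.getD lettre 0 + 1)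
        else d.insert lettre 1
      else d) PySem.Dict.empty
  (PySem.List.sorted dico.keys (fun x => x)).map
    (fun lettre => (String.singleton lettre, dico.getD lettre 0))

-- ===== PORT B =====
-- literal transliteration of B: for code in range(65, 91): n = chaine.count(chr(code)); if n != 0: resultat[chr(code)] = n
-- (each key is fresh when inserted, so the insertion-order dict is the appended association list)
def nb_apparitions_alt (chaine : String) : List (String × Int) :=
  (PySem.List.pyRange 65 91).foldl
    (fun resultat code =>
      let lettre := String.singleton (Char.ofNat code.toNat)
      let n : Int := (PySem.Str.count chaine lettre : Nat)
      if n ≠ 0 then resultat ++ [(lettre, n)] else resultat) []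

-- ===== PRECONDITION & SPEC =====
def Spec_nb_apparitions (chaine : String) (out : List (String × Int)) : Prop := out = nb_apparitions_alt chaine
instance (chaine : String) (out : List (String × Int)) : Decidable (Spec_nb_apparitions chaine out) := by unfold Spec_nb_apparitions; infer_instance

-- ===== CLAIM (what is proved, stated in full; the proofs are below) =====
def Claim_equal_nb_apparitions : Prop := ∀ (chaine : String), Dom_nb_apparitions chaine → Spec_nb_apparitions chaine (nb_apparitions chaine)

-- ===== LEMMAS AND PROOFS =====

-- the uppercase letters of the string, in order
def pvUpper (chaine : String) : List Char :=
  chaine.toList.filter (fun c => decide ('A' ≤ c ∧ c ≤ 'Z'))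

-- the alphabet as B enumerates it
def pvAlpha : List Char := (PySem.List.pyRange 65 91).map (fun code => Char.ofNat code.toNat)

lemma pvMem_alpha (c : Char) : c ∈ pvAlpha ↔ ('A' ≤ c ∧ c ≤ 'Z') := by
  have hA : 'A'.val.toNat = 65 := rfl
  have hZ : 'Z'.val.toNat = 90 := rfl
  unfold pvAlpha
  simp only [List.mem_map, PySem.List.mem_pyRange_one]
  constructor
  · rintro ⟨code, ⟨h1, h2⟩, rfl⟩
    have hv : (code.toNat).isValidChar := Or.inl (by omega)
    have ht : (Char.ofNat code.toNat).val.toNat = code.toNat := by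
      show (Char.ofNat code.toNat).toNat = code.toNat
      rw [Char.toNat_ofNat]; simp [hv]
    constructor <;> simp only [Char.le_def, UInt32.le_iff_toNat_le] <;> omega
  · rintro ⟨h1, h2⟩
    simp only [Char.le_def, UInt32.le_iff_toNat_le] at h1 h2
    exact ⟨(c.toNat : Int),
      ⟨by change (65 : Int) ≤ (c.val.toNat : Int); omega,
       by change (c.val.toNat : Int) < 91; omega⟩,
      by simp [Char.ofNat_toNat]⟩

-- Python's str.count with a single-character needle is the character count
lemma pvCountGo (c : Char) (l : List Char) : ∀ (fuel acc : Nat), l.length ≤ fuel →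
    PySem.Chars.count.go [c] fuel l acc = acc + l.count c := by
  induction l with
  | nil => intro fuel acc h; cases fuel <;> simp [PySem.Chars.count.go]
  | cons hd t ih =>
    intro fuel acc h
    cases fuel with
    | zero => simp at h
    | succ f =>
      rw [PySem.Chars.count.go]
      simp only [List.isPrefixOf, List.length, List.drop, List.count_cons]
      by_cases hc : c == hd
      · simp only [hc]
        rw [if_pos (by simp)]
        rw [ih f (acc + 1) (by simp at h; omega)]
        have : hd == c := by simpa [BEq.comm] using hc
        simp [this]; omega
      · rw [if_neg (by simp [hc])]
        rw [ih f acc (by simp at h; omega)]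
        have : (hd == c) = false := by
          rw [Bool.eq_false_iff]; intro hcon; exact hc (by simpa [BEq.comm] using hcon)
        simp [this]

lemma pvCount_single (l : List Char) (c : Char) :
    PySem.Chars.count l [c] = l.count c := by
  have := pvCountGo c l l.length 0 le_rfl
  simpa [PySem.Chars.count] using this

-- A's result, in closed form: sorted distinct uppercase letters, each with its count
lemma pvA_eq (chaine : String) :
    nb_apparitions chaine =
      (PySem.List.sorted (PySem.Set.ofList (pvUpper chaine)) (fun x => x)).map
        (fun c => (String.singleton c, ((pvUpper chaine).count c : Int))) := by
  simp only [nb_apparitions]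
  rw [PySem.List.foldl_ite_eq_foldl_filter]
  rw [PySem.List.foldl_congr_mem _ _ (fun d x => d.insert x (d.getD x 0 + 1)) _ ?_]
  · rw [PySem.Dict.foldl_insert_getD_add_one_eq_counter]
    rw [PySem.Dict.keys_counter]
    apply List.map_congr_left
    intro c hc
    rw [PySem.Dict.getD_counter]
    rfl
  · intro acc x _
    by_cases hct : acc.contains x
    · simp [hct]
    · simp only [Bool.not_eq_true] at hct
      simp [hct, PySem.Dict.getD_of_not_contains _ _ hct]

-- B's result, in closed form: the alphabet filtered to the letters present, with their counts
lemma pvB_eq (chaine : String) :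
    nb_apparitions_alt chaine =
      (pvAlpha.filter (fun c => decide (c ∈ chaine.toList))).map
        (fun c => (String.singleton c, (chaine.toList.count c : Int))) := by
  have hcnt : ∀ c : Char, PySem.Str.count chaine (String.singleton c) = chaine.toList.count c := by
    intro c
    show PySem.Chars.count chaine.toList (String.singleton c).toList = _
    rw [String.toList_singleton, pvCount_single]
  simp only [nb_apparitions_alt]
  rw [PySem.List.foldl_congr_mem _ _
    (fun resultat code =>
      if (!(PySem.Str.count chaine (String.singleton (Char.ofNat code.toNat)) == 0)) = true then
        resultat ++ [(String.singleton (Char.ofNat code.toNat),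
          ((PySem.Str.count chaine (String.singleton (Char.ofNat code.toNat)) : Nat) : Int))]
      else resultat) _
    (by intro acc x _
        by_cases h : PySem.Str.count chaine (String.singleton (Char.ofNat x.toNat)) = 0
        · simp [h]
        · simp)]
  rw [PySem.List.foldl_append_if]
  simp only [List.nil_append]
  unfold pvAlpha
  rw [List.filter_map, List.map_map]
  rw [List.filter_congr (l := PySem.List.pyRange 65 91)
    (q := (fun c => decide (c ∈ chaine.toList)) ∘ fun code => Char.ofNat code.toNat)
    (by intro code _
        simp only [Function.comp, hcnt]
        by_cases hm : Char.ofNat code.toNat ∈ chaine.toList <;> simp [hm, List.count_eq_zero])]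
  apply List.map_congr_left
  intro code _
  simp [Function.comp, pvCount_single]

-- the sorted distinct uppercase letters of the string ARE the filtered alphabet
lemma pvSorted_eq (chaine : String) :
    PySem.List.sorted (PySem.Set.ofList (pvUpper chaine)) (fun x => x) =
      pvAlpha.filter (fun c => decide (c ∈ chaine.toList)) := by
  apply PySem.List.sorted_eq_of_perm_of_pairwise_lt
  · apply List.perm_of_nodup_nodup_toFinset_eq
    · exact (by decide : pvAlpha.Nodup).filter _
    · exact PySem.Set.nodup_ofList _
    · ext c
      simp only [List.mem_toFinset, List.mem_filter, PySem.Set.mem_ofList, pvMem_alpha,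
        decide_eq_true_eq]
      unfold pvUpper
      simp only [List.mem_filter, decide_eq_true_eq]
      tauto
  · exact (by decide : pvAlpha.Pairwise (fun a b => a < b)).filter _

-- ===== VERDICT (by name: the statement is the Claim_ definition above) =====
theorem nb_apparitions_spec : Claim_equal_nb_apparitions := by
  intro chaine _
  unfold Spec_nb_apparitions
  rw [pvA_eq, pvB_eq, pvSorted_eq]
  apply List.map_congr_left
  intro c hc
  have hup : ('A' ≤ c ∧ c ≤ 'Z') := (pvMem_alpha c).mp (List.mem_filter.mp hc).1
  have : (pvUpper chaine).count c = chaine.toList.count c := by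
    unfold pvUpper
    exact List.count_filter (by simpa using hup)
  rw [this]
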